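-- pv_equiv track=rewrite | github.com/Harriet-KKim/market_intel-G_for_cursor | pipeline/intel_pipeline/tag.py | match_company_slug_ordered
-- ===== SOURCE A (Python) =====
-- def match_company_slug_ordered(
--     text: str,
--     companies_ordered: list[str],
--     keywords_by_slug: dict[str, list[str]],
-- ) -> str | None:
--     t = text.lower()
--     for slug in companies_ordered:
--         for kw in keywords_by_slug.get(slug, []):
--             if kw in t:
--                 return slug
--     return None
-- ===== SOURCE B (Python) =====
-- def match_company_slug_ordered(
--     text: str,
--     companies_ordered: list[str],
--     keywords_by_slug: dict[str, list[str]],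
-- ) -> str | None:
--     t = text.lower()
--     matched = {slug for slug, kws in keywords_by_slug.items()
--                if any(kw in t for kw in kws)}
--     for slug in companies_ordered:
--         if slug in matched:
--             return slug
--     return None
-- ===== Notes on version B (the rewrite author's own statement) =====
-- stated objective: alternative
-- what changed: B inverts the traversal: one pass over the keyword dict builds the set of slugs with a matching keyword, then the answer is the first slug of companies_ordered in that set (O(1) membership), instead of A's per-slug dict lookup with an inner keyword scan; Pre_ excludes association lists with duplicate keys, a Lean-encoding corner that cannot arise from a Python dict and on which first-match lookup order is accidental.
import Mathlib
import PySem

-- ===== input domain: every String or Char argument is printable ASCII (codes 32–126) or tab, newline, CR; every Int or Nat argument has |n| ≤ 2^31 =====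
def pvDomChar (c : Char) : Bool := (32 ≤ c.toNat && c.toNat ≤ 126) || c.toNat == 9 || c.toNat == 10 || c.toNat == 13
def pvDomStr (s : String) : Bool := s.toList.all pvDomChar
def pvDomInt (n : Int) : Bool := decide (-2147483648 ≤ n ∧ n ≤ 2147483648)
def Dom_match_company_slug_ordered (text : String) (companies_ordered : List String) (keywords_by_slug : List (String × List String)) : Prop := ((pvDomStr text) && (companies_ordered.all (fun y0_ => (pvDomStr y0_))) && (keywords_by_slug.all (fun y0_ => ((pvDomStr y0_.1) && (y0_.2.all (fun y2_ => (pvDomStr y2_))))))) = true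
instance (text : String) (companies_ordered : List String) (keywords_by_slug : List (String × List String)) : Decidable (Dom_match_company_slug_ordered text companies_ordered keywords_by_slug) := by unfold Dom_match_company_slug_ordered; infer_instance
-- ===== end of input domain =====

-- B inverts the traversal: one pass over the keyword dict collects the slugs with a matching
-- keyword into a set, then the first slug of companies_ordered in that set is returned
-- (alternative decomposition, similar cost).


-- ===== PORT A =====
-- inner 'for kw in …: if kw in t: return slug' loop, as a boolean early-exit scan
def pvAnyKwA (t : String) : List String → Bool
  | [] => false
  | kw :: rest => if PySem.Str.isIn kw t then true else pvAnyKwA t rest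

-- outer 'for slug in companies_ordered' loop with early return
def pvLoopA (t : String) (d : PySem.Dict String (List String)) : List String → Option String
  | [] => none
  | slug :: rest => if pvAnyKwA t (d.getD slug []) then some slug else pvLoopA t d rest

def match_company_slug_ordered (text : String) (companies_ordered : List String) (keywords_by_slug : List (String × List String)) : Option String :=
  let t := PySem.Str.lower text
  pvLoopA t (PySem.Dict.mk keywords_by_slug) companies_ordered

-- ===== PORT B =====
-- B's set comprehension over the dict's items
def pvMatchedSet (t : String) (d : PySem.Dict String (List String)) : PySem.Set String :=
  PySem.Set.ofList ((d.items.filter (fun p => p.2.any (fun kw => PySem.Str.isIn kw t))).map Prod.fst)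

def match_company_slug_ordered_alt (text : String) (companies_ordered : List String) (keywords_by_slug : List (String × List String)) : Option String :=
  let t := PySem.Str.lower text
  let matched := pvMatchedSet t (PySem.Dict.mk keywords_by_slug)
  companies_ordered.find? (fun slug => matched.contains slug)

-- ===== PRECONDITION & SPEC =====
-- Pre_ excludes association lists with duplicate keys: a Python dict cannot contain them, so this
-- corner exists only in the Lean encoding, where first-match lookup order is accidental.
def Pre_match_company_slug_ordered (text : String) (companies_ordered : List String) (keywords_by_slug : List (String × List String)) : Prop :=
  (keywords_by_slug.map Prod.fst).Nodup
instance (text : String) (companies_ordered : List String) (keywords_by_slug : List (String × List String)) : Decidable (Pre_match_company_slug_ordered text companies_ordered keywords_by_slug) := by unfold Pre_match_company_slug_ordered; infer_instance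

def pvWitness_match_company_slug_ordered : String × List String × (List (String × List String)) :=
  ("Alpha Inc announces results", ["beta", "alpha"], [("alpha", ["alpha inc"]), ("beta", ["beta co"])])

def Spec_match_company_slug_ordered (text : String) (companies_ordered : List String) (keywords_by_slug : List (String × List String)) (out : Option String) : Prop := out = match_company_slug_ordered_alt text companies_ordered keywords_by_slug
instance (text : String) (companies_ordered : List String) (keywords_by_slug : List (String × List String)) (out : Option String) : Decidable (Spec_match_company_slug_ordered text companies_ordered keywords_by_slug out) := by unfold Spec_match_company_slug_ordered; infer_instance

-- ===== CLAIM (what is proved, stated in full; the proofs are below) =====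
def Claim_equal_match_company_slug_ordered : Prop := ∀ (text : String) (companies_ordered : List String) (keywords_by_slug : List (String × List String)), Dom_match_company_slug_ordered text companies_ordered keywords_by_slug → Pre_match_company_slug_ordered text companies_ordered keywords_by_slug → Spec_match_company_slug_ordered text companies_ordered keywords_by_slug (match_company_slug_ordered text companies_ordered keywords_by_slug)

-- ===== LEMMAS AND PROOFS =====

-- the inner early-exit scan is List.any
theorem pvAnyKwA_eq_any (t : String) (kws : List String) :
    pvAnyKwA t kws = kws.any (fun kw => PySem.Str.isIn kw t) := by
  induction kws with
  | nil => rfl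
  | cons kw rest ih =>
    cases h : PySem.Str.isIn kw t <;> simp [pvAnyKwA, ih]

-- A's outer loop is find? with A's per-slug predicate
theorem pvLoopA_eq_find? (t : String) (d : PySem.Dict String (List String)) (cs : List String) :
    pvLoopA t d cs = cs.find? (fun slug => pvAnyKwA t (d.getD slug [])) := by
  induction cs with
  | nil => rfl
  | cons slug rest ih =>
    simp only [pvLoopA, List.find?, ih]
    split_ifs with h <;> simp [h]

theorem contains_ofList_eq {α : Type} [BEq α] [LawfulBEq α] (xs : List α) (y : α) :
    (PySem.Set.ofList xs).contains y = decide (y ∈ xs) := by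
  by_cases h : y ∈ xs
  · simp [h]
  · simp only [h, decide_false]
    by_contra hc
    simp only [Bool.not_eq_false] at hc
    exact h ((PySem.Set.mem_ofList xs y).1 ((PySem.Set.contains_iff _ _).1 hc))

-- with unique keys, first-match lookup followed by an abstract test f agrees with
-- membership among the keys whose value passes f
theorem key_lemma (f : List String → Bool) (hf : f [] = false) (slug : String) :
    ∀ (l : List (String × List String)), (l.map Prod.fst).Nodup →
    f ((Option.map (fun x => x.2) (l.find? (fun p => p.1 == slug))).getD []) =
      decide (slug ∈ (l.filter (fun p => f p.2)).map Prod.fst)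
  | [], _ => by simp [hf]
  | (k, v) :: rest, hnd => by
    simp only [List.map_cons, List.nodup_cons] at hnd
    obtain ⟨hk, hrest⟩ := hnd
    by_cases hks : k = slug
    · subst hks
      rw [List.find?_cons_of_pos (by simp)]
      simp only [Option.map_some, Option.getD_some, List.filter_cons]
      cases hfv : f v with
      | true => simp
      | false =>
        simp [hfv]
        intro x hx
        exact (hk (List.mem_map.2 ⟨(k, x), hx, rfl⟩)).elim
    · rw [List.find?_cons_of_neg (by simp [hks])]
      rw [key_lemma f hf slug rest hrest]
      simp only [List.filter_cons]
      cases hfv : f v with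
      | true => simp [Ne.symm hks]
      | false => simp

-- A's per-slug predicate agrees with membership in B's matched set
theorem pred_eq (t : String) (l : List (String × List String))
    (hnd : (l.map Prod.fst).Nodup) (slug : String) :
    pvAnyKwA t ((PySem.Dict.mk l).getD slug []) = (pvMatchedSet t (PySem.Dict.mk l)).contains slug := by
  rw [pvAnyKwA_eq_any, pvMatchedSet, contains_ofList_eq]
  exact key_lemma (fun kws => kws.any (fun kw => PySem.Str.isIn kw t)) rfl slug l hnd

-- ===== VERDICT (by name: the statement is the Claim_ definition above) =====
theorem match_company_slug_ordered_spec : Claim_equal_match_company_slug_ordered := by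
  intro text companies keywords _ hpre
  unfold Spec_match_company_slug_ordered match_company_slug_ordered match_company_slug_ordered_alt
  simp only
  rw [pvLoopA_eq_find?]
  congr 1
  funext slug
  exact pred_eq (PySem.Str.lower text) keywords hpre slug
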